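-- pv_equiv track=rewrite | github.com/topazyo/openclaw-security-playbook | scripts/verification/validate_detection_replay.py | tokenize_condition
-- ===== SOURCE A (Python) =====
-- def tokenize_condition(condition: str) -> list[str]:
--     tokens: list[str] = []
--     current: list[str] = []
--     for char in condition:
--         if char.isspace():
--             if current:
--                 tokens.append("".join(current))
--                 current = []
--             continue
--         if char in "()":
--             if current:
--                 tokens.append("".join(current))
--                 current = []
--             tokens.append(char)
--             continue
--         current.append(char)
--     if current:
--         tokens.append("".join(current))
--     return tokens
-- ===== SOURCE B (Python) =====
-- def tokenize_condition(condition: str) -> list[str]: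
--     return condition.replace("(", " ( ").replace(")", " ) ").split()
-- ===== Notes on version B (the rewrite author's own statement) =====
-- stated objective: idiomatic
-- what changed: Replaces the character-by-character accumulator loop with padding every parenthesis with spaces via str.replace and one no-argument str.split(), which uses the same whitespace definition as isspace().
import Mathlib
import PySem

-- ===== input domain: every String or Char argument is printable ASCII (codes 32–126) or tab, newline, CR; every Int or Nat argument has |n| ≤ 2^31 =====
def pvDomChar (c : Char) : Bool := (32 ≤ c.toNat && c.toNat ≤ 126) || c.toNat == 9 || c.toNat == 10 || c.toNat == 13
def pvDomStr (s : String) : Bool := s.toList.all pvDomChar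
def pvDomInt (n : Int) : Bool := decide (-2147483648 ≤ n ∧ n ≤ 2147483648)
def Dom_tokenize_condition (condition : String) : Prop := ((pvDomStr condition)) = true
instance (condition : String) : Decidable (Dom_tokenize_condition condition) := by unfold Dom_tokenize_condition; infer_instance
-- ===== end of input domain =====

-- B pads every parenthesis with spaces via str.replace and tokenizes with one no-argument
-- str.split() instead of A's character-by-character accumulator loop (objective: idiomatic).


-- ===== PORT A =====
-- loop body of A: char.isspace(), char in "()", current.append(char);
-- current is kept as List Char in order; "".join(current) is String.ofList current
def tokA_step (st : List String × List Char) (c : Char) : List String × List Char :=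
  if PySem.Chars.isspace c then
    (if st.2.isEmpty then (st.1, []) else (st.1 ++ [String.ofList st.2], []))
  else if c = '(' ∨ c = ')' then
    ((if st.2.isEmpty then st.1 else st.1 ++ [String.ofList st.2]) ++ [String.ofList [c]], [])
  else
    (st.1, st.2 ++ [c])

def tokenize_condition (condition : String) : List String :=
  let st := condition.toList.foldl tokA_step ([], [])
  if st.2.isEmpty then st.1 else st.1 ++ [String.ofList st.2]

-- ===== PORT B =====
def tokenize_condition_alt (condition : String) : List String :=
  PySem.Str.split₀ (PySem.Str.replace (PySem.Str.replace condition "(" " ( ") ")" " ) ")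

-- ===== PRECONDITION & SPEC =====
def Spec_tokenize_condition (condition : String) (out : List String) : Prop := out = tokenize_condition_alt condition
instance (condition : String) (out : List String) : Decidable (Spec_tokenize_condition condition out) := by unfold Spec_tokenize_condition; infer_instance

-- ===== CLAIM (what is proved, stated in full; the proofs are below) =====
def Claim_equal_tokenize_condition : Prop := ∀ (condition : String), Dom_tokenize_condition condition → Spec_tokenize_condition condition (tokenize_condition condition)

-- ===== LEMMAS AND PROOFS =====

-- common tokenizer specification both ports are reduced to
def tok : List Char → List Char → List (List Char)
  | [], cur => if cur = [] then [] else [cur]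
  | c :: cs, cur =>
    if PySem.Chars.isspace c then
      (if cur = [] then tok cs [] else cur :: tok cs [])
    else if c = '(' ∨ c = ')' then
      (if cur = [] then [c] :: tok cs [] else cur :: [c] :: tok cs [])
    else
      tok cs (cur ++ [c])

-- the combined effect of the two replaces, per character
def padParen (c : Char) : List Char :=
  if c = '(' then [' ', '(', ' '] else if c = ')' then [' ', ')', ' '] else [c]

lemma replace_go_singleton (o : Char) (new : List Char) :
    ∀ (cs : List Char) (fuel : Nat) (acc : List Char), cs.length ≤ fuel →
      PySem.Chars.replace.go [o] new fuel cs acc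
        = acc.reverse ++ cs.flatMap (fun c => if c = o then new else [c]) := by
  intro cs
  induction cs with
  | nil =>
    intro fuel acc _
    cases fuel <;> simp [PySem.Chars.replace.go]
  | cons c t ih =>
    intro fuel acc hf
    cases fuel with
    | zero => simp at hf
    | succ fuel =>
      by_cases hc : c = o
      · subst hc
        have hpre : List.isPrefixOf [c] (c :: t) = true := by
          simp [List.isPrefixOf]
        rw [PySem.Chars.replace.go, if_pos hpre,
          show List.drop ([c] : List Char).length (c :: t) = t from rfl]
        rw [ih fuel (new.reverse ++ acc) (by simpa using Nat.le_of_succ_le_succ hf)]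
        simp
      · have hpre : List.isPrefixOf [o] (c :: t) = false := by
          simp [List.isPrefixOf]
          intro h; exact hc h.symm
        rw [PySem.Chars.replace.go, if_neg (by simp [hpre])]
        rw [ih fuel (c :: acc) (by simpa using Nat.le_of_succ_le_succ hf)]
        simp [hc]

lemma replace_singleton (o : Char) (new cs : List Char) :
    PySem.Chars.replace cs [o] new = cs.flatMap (fun c => if c = o then new else [c]) := by
  rw [PySem.Chars.replace]
  simp only [List.isEmpty_cons]
  exact replace_go_singleton o new cs cs.length [] le_rfl

lemma double_replace_eq (cs : List Char) :
    PySem.Chars.replace (PySem.Chars.replace cs ['('] [' ', '(', ' ']) [')'] [' ', ')', ' ']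
      = cs.flatMap padParen := by
  rw [replace_singleton, replace_singleton]
  induction cs with
  | nil => rfl
  | cons c t ih =>
    by_cases h1 : c = '(' <;> by_cases h2 : c = ')' <;>
      simp_all [padParen]

lemma split_go_flatMap :
    ∀ (cs cur : List Char) (acc : List (List Char)),
      PySem.Chars.split₀.go (cs.flatMap padParen) cur acc = acc.reverse ++ tok cs cur.reverse := by
  intro cs
  induction cs with
  | nil =>
    intro cur acc
    by_cases hc : cur = [] <;> simp [PySem.Chars.split₀.go, tok, hc]
  | cons c t ih =>
    intro cur acc
    by_cases h1 : c = '('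
    · subst h1
      by_cases hc : cur = [] <;>
        simp [padParen, PySem.Chars.split₀.go, tok, hc, ih, show PySem.Chars.isspace ' ' = true from rfl,
          show PySem.Chars.isspace '(' = false from rfl]
    · by_cases h2 : c = ')'
      · subst h2
        by_cases hc : cur = [] <;>
          simp [padParen, PySem.Chars.split₀.go, tok, hc, ih, h1, show PySem.Chars.isspace ' ' = true from rfl,
            show PySem.Chars.isspace ')' = false from rfl]
      · by_cases hs : PySem.Chars.isspace c
        · by_cases hc : cur = [] <;>
            simp [padParen, PySem.Chars.split₀.go, tok, hc, ih, h1, h2, hs]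
        · simp [padParen, PySem.Chars.split₀.go, tok, ih, h1, h2, hs]

lemma tokA_inv :
    ∀ (cs : List Char) (tokens : List String) (cur : List Char),
      (let st := cs.foldl tokA_step (tokens, cur)
       if st.2.isEmpty then st.1 else st.1 ++ [String.ofList st.2])
        = tokens ++ (tok cs cur).map String.ofList := by
  intro cs
  induction cs with
  | nil =>
    intro tokens cur
    by_cases hc : cur = [] <;> simp [tok, hc]
  | cons c t ih =>
    intro tokens cur
    by_cases hs : PySem.Chars.isspace c
    · by_cases hc : cur = []
      · simpa [tokA_step, tok, hs, hc] using ih tokens []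
      · simpa [tokA_step, tok, hs, hc] using ih (tokens ++ [String.ofList cur]) []
    · by_cases hp : c = '(' ∨ c = ')'
      · by_cases hc : cur = []
        · simpa [tokA_step, tok, hs, hp, hc] using ih (tokens ++ [String.ofList [c]]) []
        · simpa [tokA_step, tok, hs, hp, hc] using
            ih (tokens ++ [String.ofList cur] ++ [String.ofList [c]]) []
      · simpa [tokA_step, tok, hs, hp] using ih tokens (cur ++ [c])

-- ===== VERDICT (by name: the statement is the Claim_ definition above) =====
theorem tokenize_condition_spec : Claim_equal_tokenize_condition := by
  intro condition _
  show tokenize_condition condition = tokenize_condition_alt condition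
  have hA : tokenize_condition condition
      = (tok condition.toList []).map String.ofList := by
    have := tokA_inv condition.toList [] []
    simpa [tokenize_condition] using this
  have hB : tokenize_condition_alt condition
      = (tok condition.toList []).map String.ofList := by
    unfold tokenize_condition_alt
    rw [PySem.Str.split₀, PySem.Str.replace, PySem.Str.replace]
    have h1 : (String.ofList (PySem.Chars.replace condition.toList "(".toList " ( ".toList)).toList
        = PySem.Chars.replace condition.toList "(".toList " ( ".toList := by simp
    rw [h1]
    have h2 : ("(".toList : List Char) = ['('] := by decide
    have h3 : (" ( ".toList : List Char) = [' ', '(', ' '] := by decide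
    have h4 : (")".toList : List Char) = [')'] := by decide
    have h5 : (" ) ".toList : List Char) = [' ', ')', ' '] := by decide
    rw [h2, h3, h4, h5, double_replace_eq, PySem.Chars.split₀]
    rw [show (String.ofList (condition.toList.flatMap padParen)).toList
          = condition.toList.flatMap padParen from by simp]
    rw [split_go_flatMap condition.toList [] []]
    simp
  rw [hA, hB]
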